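-- pv_equiv track=rewrite | github.com/natebrix/proust | proust/runner.py | _has_mixed_target_pair
-- ===== SOURCE A (Python) =====
-- def _has_mixed_target_pair(events, target):
--     polarities = set()
--     for event in events:
--         if event.get("target") != target:
--             continue
--         if event.get("source") == target:
--             continue
--         polarity = event.get("polarity")
--         if polarity in {"positive", "negative"}:
--             polarities.add(polarity)
--     return polarities == {"positive", "negative"}
-- ===== SOURCE B (Python) =====
-- def _hit(events, target, pol):
--     return any(
--         e.get("target") == target and e.get("source") != target and e.get("polarity") == pol
--         for e in events
--     )
--
--
-- def _has_mixed_target_pair(events, target):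
--     return _hit(events, target, "positive") and _hit(events, target, "negative")
-- ===== Notes on version B (the rewrite author's own statement) =====
-- stated objective: simpler
-- what changed: Replaces the single pass that accumulates a set of seen polarities and compares it for set equality with two independent any() existence scans (one per polarity) combined with 'and'.
import Mathlib
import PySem

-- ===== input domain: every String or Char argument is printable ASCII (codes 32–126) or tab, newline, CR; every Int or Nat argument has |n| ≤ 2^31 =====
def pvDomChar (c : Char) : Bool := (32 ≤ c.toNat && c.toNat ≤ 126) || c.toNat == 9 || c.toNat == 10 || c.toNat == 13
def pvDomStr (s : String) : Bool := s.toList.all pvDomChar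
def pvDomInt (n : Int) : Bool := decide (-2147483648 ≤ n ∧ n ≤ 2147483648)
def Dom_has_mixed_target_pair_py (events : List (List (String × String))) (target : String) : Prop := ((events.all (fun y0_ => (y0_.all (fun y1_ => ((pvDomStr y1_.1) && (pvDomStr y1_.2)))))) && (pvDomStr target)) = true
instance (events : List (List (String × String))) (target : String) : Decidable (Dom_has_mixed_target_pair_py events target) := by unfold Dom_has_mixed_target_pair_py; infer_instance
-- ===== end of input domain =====

-- B replaces A's one-pass set accumulation + set-equality test by two independent
-- existence scans (one per polarity) combined with &&; objective: simpler.

-- ===== PORT A =====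
-- the loop body of A: maybe add the event's polarity to the accumulated set
def pvStepA (target : String) (polarities : PySem.Set String) (event : List (String × String)) : PySem.Set String :=
  if PySem.Dict.get? (PySem.Dict.mk event) "target" ≠ some target then polarities
  else if PySem.Dict.get? (PySem.Dict.mk event) "source" = some target then polarities
  else
    match PySem.Dict.get? (PySem.Dict.mk event) "polarity" with
    | some p => if PySem.Set.contains (PySem.Set.ofList ["positive", "negative"]) p then PySem.Set.add polarities p else polarities
    | none => polarities

def has_mixed_target_pair_py (events : List (List (String × String))) (target : String) : Bool :=
  let polarities := events.foldl (pvStepA target) PySem.Set.empty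
  PySem.Set.equal polarities (PySem.Set.ofList ["positive", "negative"])

-- ===== PORT B =====
-- is there an event targeting `target` (not self-sourced) with the given polarity?
def pvHit (events : List (List (String × String))) (target : String) (pol : String) : Bool :=
  events.any (fun e =>
    PySem.Dict.get? (PySem.Dict.mk e) "target" == some target
      && !(PySem.Dict.get? (PySem.Dict.mk e) "source" == some target)
      && PySem.Dict.get? (PySem.Dict.mk e) "polarity" == some pol)

def has_mixed_target_pair_py_alt (events : List (List (String × String))) (target : String) : Bool :=
  pvHit events target "positive" && pvHit events target "negative"

-- ===== PRECONDITION & SPEC =====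
def Spec_has_mixed_target_pair_py (events : List (List (String × String))) (target : String) (out : Bool) : Prop := out = has_mixed_target_pair_py_alt events target
instance (events : List (List (String × String))) (target : String) (out : Bool) : Decidable (Spec_has_mixed_target_pair_py events target out) := by unfold Spec_has_mixed_target_pair_py; infer_instance

-- ===== CLAIM (what is proved, stated in full; the proofs are below) =====
def Claim_equal_has_mixed_target_pair_py : Prop := ∀ (events : List (List (String × String))) (target : String), Dom_has_mixed_target_pair_py events target → Spec_has_mixed_target_pair_py events target (has_mixed_target_pair_py events target)

-- ===== LEMMAS AND PROOFS =====

-- membership in A's accumulated set, characterised by B's existence scans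
theorem pv_mem_fold (target : String) (events : List (List (String × String)))
    (s : PySem.Set String) (x : String) :
    (x ∈ events.foldl (pvStepA target) s) ↔
      x ∈ s ∨ (x = "positive" ∧ pvHit events target "positive" = true)
            ∨ (x = "negative" ∧ pvHit events target "negative" = true) := by
  induction events generalizing s with
  | nil => simp [pvHit]
  | cons e es ih =>
    rw [List.foldl_cons, ih]
    have hone : ∀ pol, pvHit (e :: es) target pol = true ↔
        ((PySem.Dict.get? (PySem.Dict.mk e) "target" == some target
          && !(PySem.Dict.get? (PySem.Dict.mk e) "source" == some target)
          && PySem.Dict.get? (PySem.Dict.mk e) "polarity" == some pol) = true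
         ∨ pvHit es target pol = true) := by
      intro pol; simp [pvHit]
    rw [hone, hone]
    unfold pvStepA
    split_ifs with h1 h2
    · simp only [beq_iff_eq] at *
      constructor
      · rintro (hx | ⟨hx, hp⟩ | ⟨hx, hp⟩)
        · exact Or.inl hx
        · exact Or.inr (Or.inl ⟨hx, Or.inr hp⟩)
        · exact Or.inr (Or.inr ⟨hx, Or.inr hp⟩)
      · rintro (hx | ⟨hx, hp | hp⟩ | ⟨hx, hp | hp⟩)
        · exact Or.inl hx
        · simp at hp; exact absurd hp.1.1 h1
        · exact Or.inr (Or.inl ⟨hx, hp⟩)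
        · simp at hp; exact absurd hp.1.1 h1
        · exact Or.inr (Or.inr ⟨hx, hp⟩)
    · simp only [not_not] at *
      constructor
      · rintro (hx | ⟨hx, hp⟩ | ⟨hx, hp⟩)
        · exact Or.inl hx
        · exact Or.inr (Or.inl ⟨hx, Or.inr hp⟩)
        · exact Or.inr (Or.inr ⟨hx, Or.inr hp⟩)
      · rintro (hx | ⟨hx, hp | hp⟩ | ⟨hx, hp | hp⟩)
        · exact Or.inl hx
        · simp [h2] at hp
        · exact Or.inr (Or.inl ⟨hx, hp⟩)
        · simp [h2] at hp
        · exact Or.inr (Or.inr ⟨hx, hp⟩)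
    · -- event matches target, not self-sourced: case on its polarity
      rcases hp : PySem.Dict.get? (PySem.Dict.mk e) "polarity" with _ | p
      · simp only [hp]
        constructor
        · rintro (hx | ⟨hx, hq⟩ | ⟨hx, hq⟩)
          · exact Or.inl hx
          · exact Or.inr (Or.inl ⟨hx, Or.inr hq⟩)
          · exact Or.inr (Or.inr ⟨hx, Or.inr hq⟩)
        · rintro (hx | ⟨hx, hq | hq⟩ | ⟨hx, hq | hq⟩)
          · exact Or.inl hx
          · simp [hp] at hq
          · exact Or.inr (Or.inl ⟨hx, hq⟩)
          · simp [hp] at hq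
          · exact Or.inr (Or.inr ⟨hx, hq⟩)
      · simp only [hp]
        by_cases hmem : PySem.Set.contains (PySem.Set.ofList ["positive", "negative"]) p = true
        · have hpn : p = "positive" ∨ p = "negative" := by
            have := (PySem.Set.contains_iff _ _).mp hmem
            simpa [PySem.Set.ofList] using this
          simp only [hmem, if_true, PySem.Set.mem_add]
          constructor
          · rintro ((hx | hx) | ⟨hx, hq⟩ | ⟨hx, hq⟩)
            · exact Or.inl hx
            · subst hx
              rcases hpn with hq | hq
              · exact Or.inr (Or.inl ⟨hq, Or.inl (by simp only [not_not] at h1; simp [h1, h2, hp, hq])⟩)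
              · exact Or.inr (Or.inr ⟨hq, Or.inl (by simp only [not_not] at h1; simp [h1, h2, hp, hq])⟩)
            · exact Or.inr (Or.inl ⟨hx, Or.inr hq⟩)
            · exact Or.inr (Or.inr ⟨hx, Or.inr hq⟩)
          · rintro (hx | ⟨hx, hq | hq⟩ | ⟨hx, hq | hq⟩)
            · exact Or.inl (Or.inl hx)
            · simp only [Bool.and_eq_true, beq_iff_eq] at hq
              exact Or.inl (Or.inr (by rw [hx]; exact (Option.some.inj hq.2).symm))
            · exact Or.inr (Or.inl ⟨hx, hq⟩)
            · simp only [Bool.and_eq_true, beq_iff_eq] at hq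
              exact Or.inl (Or.inr (by rw [hx]; exact (Option.some.inj hq.2).symm))
            · exact Or.inr (Or.inr ⟨hx, hq⟩)
        · have hpn : p ≠ "positive" ∧ p ≠ "negative" := by
            constructor <;> intro hq <;> exact hmem ((PySem.Set.contains_iff _ _).mpr (by simp [PySem.Set.ofList, hq]))
          simp only [hmem, if_false]
          constructor
          · rintro (hx | ⟨hx, hq⟩ | ⟨hx, hq⟩)
            · exact Or.inl hx
            · exact Or.inr (Or.inl ⟨hx, Or.inr hq⟩)
            · exact Or.inr (Or.inr ⟨hx, Or.inr hq⟩)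
          · rintro (hx | ⟨hx, hq | hq⟩ | ⟨hx, hq | hq⟩)
            · exact Or.inl hx
            · simp only [Bool.and_eq_true, beq_iff_eq, hp] at hq
              exact absurd (Option.some.inj hq.2) hpn.1
            · exact Or.inr (Or.inl ⟨hx, hq⟩)
            · simp only [Bool.and_eq_true, beq_iff_eq, hp] at hq
              exact absurd (Option.some.inj hq.2) hpn.2
            · exact Or.inr (Or.inr ⟨hx, hq⟩)

-- ===== VERDICT (by name: the statement is the Claim_ definition above) =====
theorem has_mixed_target_pair_py_spec : Claim_equal_has_mixed_target_pair_py := by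
  intro events target _
  unfold Spec_has_mixed_target_pair_py has_mixed_target_pair_py has_mixed_target_pair_py_alt
  rcases hp : pvHit events target "positive" with _ | _ <;>
  rcases hn : pvHit events target "negative" with _ | _ <;>
  simp only [Bool.and_self, Bool.and_true, Bool.and_false, Bool.true_and, Bool.false_and]
  · rw [Bool.eq_false_iff]
    intro hq
    have := ((PySem.Set.equal_iff _ _).mp hq "positive")
    rw [pv_mem_fold] at this
    have : ("positive" : String) ∈ PySem.Set.ofList ["positive", "negative"] → False := by
      intro hmem
      rcases this.mpr hmem with h | ⟨_, h⟩ | ⟨h, _⟩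
      · exact absurd h (by simp [PySem.Set.empty])
      · rw [h] at hp; exact absurd hp (by decide)
      · exact absurd h (by decide)
    exact this (by simp [PySem.Set.ofList])
  · rw [Bool.eq_false_iff]
    intro hq
    have := ((PySem.Set.equal_iff _ _).mp hq "positive")
    rw [pv_mem_fold] at this
    have : ("positive" : String) ∈ PySem.Set.ofList ["positive", "negative"] → False := by
      intro hmem
      rcases this.mpr hmem with h | ⟨_, h⟩ | ⟨h, _⟩
      · exact absurd h (by simp [PySem.Set.empty])
      · rw [h] at hp; exact absurd hp (by decide)
      · exact absurd h (by decide)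
    exact this (by simp [PySem.Set.ofList])
  · rw [Bool.eq_false_iff]
    intro hq
    have := ((PySem.Set.equal_iff _ _).mp hq "negative")
    rw [pv_mem_fold] at this
    have : ("negative" : String) ∈ PySem.Set.ofList ["positive", "negative"] → False := by
      intro hmem
      rcases this.mpr hmem with h | ⟨h, _⟩ | ⟨_, h⟩
      · exact absurd h (by simp [PySem.Set.empty])
      · exact absurd h (by decide)
      · rw [h] at hn; exact absurd hn (by decide)
    exact this (by simp [PySem.Set.ofList])
  · apply (PySem.Set.equal_iff _ _).mpr
    intro x
    rw [pv_mem_fold]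
    constructor
    · rintro (h | ⟨h, _⟩ | ⟨h, _⟩)
      · exact absurd h (by simp [PySem.Set.empty])
      · simp [PySem.Set.ofList, h]
      · simp [PySem.Set.ofList, h]
    · intro hmem
      have : x = "positive" ∨ x = "negative" := by simpa [PySem.Set.ofList] using hmem
      rcases this with h | h
      · exact Or.inr (Or.inl ⟨h, hp⟩)
      · exact Or.inr (Or.inr ⟨h, hn⟩)
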